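-- pv_equiv track=rewrite | github.com/lucasvtiradentes/md-align | src/mdalign/checks/box_spacing.py | _is_complex_multi_column
-- ===== SOURCE A (Python) =====
-- def _is_complex_multi_column(box_insertions):
--     left_insertions = [ins for ins in box_insertions if ins[2] == "left"]
--     if len(left_insertions) <= 1:
--         return False
--     cols = set(ins[0] for ins in left_insertions)
--     if len(cols) <= 1:
--         return False
--     line_sets = [set(ins[3]) for ins in left_insertions]
--     for i, lines_a in enumerate(line_sets):
--         for lines_b in line_sets[i + 1 :]:
--             if not lines_a & lines_b:
--                 return True
--     return False
-- ===== SOURCE B (Python) =====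
-- def _is_complex_multi_column(box_insertions):
--     left_insertions = [ins for ins in box_insertions if ins[2] == "left"]
--     if len(left_insertions) <= 1:
--         return False
--     cols = set(ins[0] for ins in left_insertions)
--     if len(cols) <= 1:
--         return False
--     line_sets = [set(ins[3]) for ins in left_insertions]
--     n = len(line_sets)
--     index = {}
--     for i, s in enumerate(line_sets):
--         for line in s:
--             index.setdefault(line, set()).add(i)
--     for i, s in enumerate(line_sets):
--         neighbors = set()
--         for line in s:
--             neighbors |= index[line]
--         neighbors.discard(i)
--         if len(neighbors) < n - 1:
--             return True
--     return False
-- ===== Notes on version B (the rewrite author's own statement) =====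
-- stated objective: alternative
-- what changed: Replaced A's quadratic all-pairs set-intersection scan with an inverted index (line -> set of insertion indices): for each insertion, the union of its lines' buckets minus itself has fewer than n-1 members exactly when some other insertion shares no line with it.
import Mathlib
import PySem

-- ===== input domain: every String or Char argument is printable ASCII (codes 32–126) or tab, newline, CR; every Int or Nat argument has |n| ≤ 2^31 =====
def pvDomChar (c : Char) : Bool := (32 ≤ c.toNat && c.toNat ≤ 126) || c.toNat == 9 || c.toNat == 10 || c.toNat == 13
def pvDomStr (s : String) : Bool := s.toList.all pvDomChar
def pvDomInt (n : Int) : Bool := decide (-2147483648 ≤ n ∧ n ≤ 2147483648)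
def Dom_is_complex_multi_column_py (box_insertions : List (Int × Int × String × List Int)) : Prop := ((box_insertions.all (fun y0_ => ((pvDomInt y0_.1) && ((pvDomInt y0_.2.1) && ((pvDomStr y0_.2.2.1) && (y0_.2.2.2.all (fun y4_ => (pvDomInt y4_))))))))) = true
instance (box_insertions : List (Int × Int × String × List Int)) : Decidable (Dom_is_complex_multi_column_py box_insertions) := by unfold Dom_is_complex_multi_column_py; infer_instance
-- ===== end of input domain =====

-- B replaces A's quadratic all-pairs disjointness scan by an inverted index line → set of
-- insertion indices plus a counting argument (objective: alternative; same result proved equal).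

-- ===== PORT A =====
-- 'for i, lines_a in enumerate(line_sets): for lines_b in line_sets[i+1:]: if not lines_a & lines_b: return True'
def pvLoopA : List (List Int) → Bool
  | [] => false
  | a :: rest => rest.any (fun b => (PySem.Set.inter a b).isEmpty) || pvLoopA rest

def is_complex_multi_column_py (box_insertions : List (Int × Int × String × List Int)) : Bool :=
  let left := box_insertions.filter (fun ins => ins.2.2.1 == "left")
  if left.length ≤ 1 then false
  else if (PySem.Set.ofList (left.map (fun ins => ins.1))).length ≤ 1 then false
  else pvLoopA (left.map (fun ins => PySem.Set.ofList ins.2.2.2))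

-- ===== PORT B =====
-- 'for i, s in enumerate(line_sets): for line in s: index.setdefault(line, set()).add(i)'
def pvBuildIndex (sets : List (List Int)) : PySem.Dict Int (List Int) :=
  (PySem.List.enumerate sets).foldl
    (fun d p => p.2.foldl (fun d line => d.modify line [] (fun s => PySem.Set.add s p.1)) d)
    PySem.Dict.empty

-- second loop of Source B; 'index[line]' is ported as getD with default [] — it is exact here
-- because every line of s was inserted into the index by the first loop (no KeyError).
def pvLoopB (index : PySem.Dict Int (List Int)) (n : Int) (sets : List (List Int)) : Bool :=
  (PySem.List.enumerate sets).any (fun p =>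
    let neighbors := p.2.foldl (fun acc line => PySem.Set.union acc (index.getD line [])) []
    decide (((PySem.Set.discard neighbors p.1).length : Int) < n - 1))

def is_complex_multi_column_py_alt (box_insertions : List (Int × Int × String × List Int)) : Bool :=
  let left := box_insertions.filter (fun ins => ins.2.2.1 == "left")
  if left.length ≤ 1 then false
  else if (PySem.Set.ofList (left.map (fun ins => ins.1))).length ≤ 1 then false
  else
    let sets := left.map (fun ins => PySem.Set.ofList ins.2.2.2)
    pvLoopB (pvBuildIndex sets) (sets.length : Int) sets

-- ===== PRECONDITION & SPEC =====
def Spec_is_complex_multi_column_py (box_insertions : List (Int × Int × String × List Int)) (out : Bool) : Prop := out = is_complex_multi_column_py_alt box_insertions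
instance (box_insertions : List (Int × Int × String × List Int)) (out : Bool) : Decidable (Spec_is_complex_multi_column_py box_insertions out) := by unfold Spec_is_complex_multi_column_py; infer_instance

-- ===== CLAIM (what is proved, stated in full; the proofs are below) =====
def Claim_equal_is_complex_multi_column_py : Prop := ∀ (box_insertions : List (Int × Int × String × List Int)), Dom_is_complex_multi_column_py box_insertions → Spec_is_complex_multi_column_py box_insertions (is_complex_multi_column_py box_insertions)

-- ===== LEMMAS AND PROOFS =====

-- disjointness as used by both ports
theorem pv_inter_nil_iff (a b : List Int) :
    PySem.Set.inter a b = [] ↔ ∀ v : Int, v ∈ a → v ∉ b := by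
  rw [List.eq_nil_iff_forall_not_mem]
  constructor
  · intro h v hva hvb; exact h v (by rw [PySem.Set.mem_inter]; exact ⟨hva, hvb⟩)
  · intro h v hv; rw [PySem.Set.mem_inter] at hv; exact h v hv.1 hv.2

theorem pv_inter_nil_comm (a b : List Int) :
    PySem.Set.inter a b = [] ↔ PySem.Set.inter b a = [] := by
  rw [pv_inter_nil_iff, pv_inter_nil_iff]
  constructor <;> (intro h v hv hv'; exact h v hv' hv)

-- characterization of A's nested loop
theorem pvLoopA_iff (L : List (List Int)) :
    pvLoopA L = true ↔ ∃ (i j : Nat) (hi : i < L.length) (hj : j < L.length),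
      i < j ∧ PySem.Set.inter L[i] L[j] = [] := by
  induction L with
  | nil => simp [pvLoopA]
  | cons a rest ih =>
    simp only [pvLoopA, Bool.or_eq_true, List.any_eq_true, ih, List.isEmpty_iff]
    constructor
    · rintro (⟨b, hb, hab⟩ | ⟨i, j, hi, hj, hij, hinter⟩)
      · obtain ⟨j', hj', rfl⟩ := List.mem_iff_getElem.mp hb
        exact ⟨0, j' + 1, by simp, by simp [hj'], by omega, by simpa using hab⟩
      · exact ⟨i + 1, j + 1, by simpa using hi, by simpa using hj, by omega, by simpa using hinter⟩
    · rintro ⟨i, j, hi, hj, hij, hinter⟩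
      cases j with
      | zero => omega
      | succ jj =>
        cases i with
        | zero =>
          left
          exact ⟨rest[jj]'(by simpa using hj), List.getElem_mem _, by simpa using hinter⟩
        | succ ii =>
          right
          exact ⟨ii, jj, by simpa using hi, by simpa using hj, by omega, by simpa using hinter⟩

-- inner fold of the index builder
theorem pv_inner_mem (x : List Int) (i : Int) (d : PySem.Dict Int (List Int)) (line j : Int) :
    j ∈ ((x.foldl (fun d line => d.modify line [] (fun s => PySem.Set.add s i)) d).getD line []) ↔
      j ∈ d.getD line [] ∨ (j = i ∧ line ∈ x) := by
  induction x generalizing d with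
  | nil => simp
  | cons hd tl ih =>
    simp only [List.foldl_cons, ih, PySem.Dict.getD_modify, List.mem_cons]
    by_cases hl : line = hd
    · subst hl; simp [PySem.Set.mem_add]; tauto
    · simp [hl]

-- outer fold of the index builder
theorem pv_build_aux (sets : List (List Int)) (s : Int) (d : PySem.Dict Int (List Int)) (line j : Int) :
    j ∈ (((PySem.List.enumerate sets s).foldl
        (fun d p => p.2.foldl (fun d line => d.modify line [] (fun s => PySem.Set.add s p.1)) d) d).getD line []) ↔
      j ∈ d.getD line [] ∨ ∃ (k : Nat) (h : k < sets.length), j = s + k ∧ line ∈ sets[k] := by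
  induction sets generalizing s d with
  | nil => simp [PySem.List.enumerate_nil]
  | cons x xs ih =>
    rw [PySem.List.enumerate_cons, List.foldl_cons]
    rw [ih, pv_inner_mem]
    constructor
    · rintro ((hd | ⟨rfl, hx⟩) | ⟨k, hk, rfl, hk'⟩)
      · exact Or.inl hd
      · exact Or.inr ⟨0, by simp, by simp, by simpa using hx⟩
      · refine Or.inr ⟨k + 1, by simpa using hk, by push_cast; ring, by simpa using hk'⟩
    · rintro (hd | ⟨k, hk, rfl, hk'⟩)
      · exact Or.inl (Or.inl hd)
      · cases k with
        | zero => exact Or.inl (Or.inr ⟨by simp, by simpa using hk'⟩)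
        | succ kk =>
          exact Or.inr ⟨kk, by simpa using hk, by push_cast; ring, by simpa using hk'⟩

theorem pv_bucket_mem (sets : List (List Int)) (line j : Int) :
    j ∈ (pvBuildIndex sets).getD line [] ↔
      ∃ (k : Nat) (h : k < sets.length), j = (k : Int) ∧ line ∈ sets[k] := by
  unfold pvBuildIndex
  rw [pv_build_aux]
  simp [PySem.Dict.getD_empty]

-- neighbors fold
theorem pv_neighbors_mem (si : List Int) (index : PySem.Dict Int (List Int)) (acc : List Int) (j : Int) :
    j ∈ si.foldl (fun acc line => PySem.Set.union acc (index.getD line [])) acc ↔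
      j ∈ acc ∨ ∃ line ∈ si, j ∈ index.getD line [] := by
  induction si generalizing acc with
  | nil => simp
  | cons hd tl ih => simp [List.foldl_cons, ih, PySem.Set.mem_union]; tauto

theorem pv_neighbors_nodup (si : List Int) (index : PySem.Dict Int (List Int)) (acc : List Int)
    (h : acc.Nodup) :
    (si.foldl (fun acc line => PySem.Set.union acc (index.getD line [])) acc).Nodup := by
  induction si generalizing acc with
  | nil => exact h
  | cons hd tl ih => exact ih _ (PySem.Set.nodup_union _ _ h)

-- counting: |discard N i| < n - 1  ↔  some other index is disjoint from sets[iN]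
theorem pv_count_iff (sets : List (List Int)) (iN : Nat) (hiN : iN < sets.length) :
    (((PySem.Set.discard
        (sets[iN].foldl (fun acc line => PySem.Set.union acc ((pvBuildIndex sets).getD line [])) [])
        (iN : Int)).length : Int) < (sets.length : Int) - 1) ↔
      ∃ (k : Nat) (h : k < sets.length), k ≠ iN ∧ PySem.Set.inter sets[k] sets[iN] = [] := by
  set n := sets.length with hn
  set N := sets[iN].foldl (fun acc line => PySem.Set.union acc ((pvBuildIndex sets).getD line [])) ([] : List Int) with hN
  set M := PySem.Set.discard N (iN : Int) with hM
  have hNmem : ∀ j : Int, j ∈ N ↔ ∃ (k : Nat) (h : k < n), j = (k : Int) ∧ PySem.Set.inter sets[k] sets[iN] ≠ [] := by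
    intro j
    rw [hN, pv_neighbors_mem]
    simp only [List.not_mem_nil, false_or]
    constructor
    · rintro ⟨line, hline, hbucket⟩
      obtain ⟨k, hk, rfl, hlk⟩ := (pv_bucket_mem sets line j).mp hbucket
      refine ⟨k, hk, rfl, ?_⟩
      simp only [Ne, pv_inter_nil_iff]
      push Not
      exact ⟨line, hlk, hline⟩
    · rintro ⟨k, hk, rfl, hne⟩
      simp only [Ne, pv_inter_nil_iff] at hne
      push Not at hne
      obtain ⟨v, hv1, hv2⟩ := hne
      exact ⟨v, hv2, (pv_bucket_mem sets v (k : Int)).mpr ⟨k, hk, rfl, hv1⟩⟩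
  have hMmem : ∀ j : Int, j ∈ M ↔ ∃ (k : Nat) (h : k < n), j = (k : Int) ∧ k ≠ iN ∧ PySem.Set.inter sets[k] sets[iN] ≠ [] := by
    intro j
    rw [hM, PySem.Set.mem_discard, hNmem]
    constructor
    · rintro ⟨⟨k, hk, rfl, hne⟩, hji⟩
      exact ⟨k, hk, rfl, by simpa using hji, hne⟩
    · rintro ⟨k, hk, rfl, hki, hne⟩
      exact ⟨⟨k, hk, rfl, hne⟩, by simpa using hki⟩
  have hMnodup : M.Nodup := PySem.Set.nodup_discard _ _ (pv_neighbors_nodup _ _ _ List.nodup_nil)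
  have hcard : M.length = M.toFinset.card := (List.toFinset_card_of_nodup hMnodup).symm
  set T : Finset Int := ((Finset.range n).image (fun k : Nat => (k : Int))).erase (iN : Int) with hT
  have hinj : Function.Injective (fun k : Nat => (k : Int)) := fun a b h => by simpa using h
  have hTcard : T.card = n - 1 := by
    rw [hT, Finset.card_erase_of_mem, Finset.card_image_of_injective _ hinj, Finset.card_range]
    exact Finset.mem_image.mpr ⟨iN, Finset.mem_range.mpr hiN, rfl⟩
  have hsub : M.toFinset ⊆ T := by
    intro j hj
    rw [List.mem_toFinset, hMmem] at hj
    obtain ⟨k, hk, rfl, hki, _⟩ := hj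
    exact Finset.mem_erase.mpr ⟨by simpa using hki, Finset.mem_image.mpr ⟨k, Finset.mem_range.mpr hk, rfl⟩⟩
  constructor
  · intro hlt
    have hlt' : M.toFinset.card < T.card := by
      rw [hTcard, ← hcard]; omega
    obtain ⟨j, hjT, hjM⟩ := Finset.exists_mem_notMem_of_card_lt_card hlt'
    rw [hT, Finset.mem_erase, Finset.mem_image] at hjT
    obtain ⟨hji, k, hk, rfl⟩ := hjT
    refine ⟨k, Finset.mem_range.mp hk, by simpa using hji, ?_⟩
    by_contra hne
    exact hjM (List.mem_toFinset.mpr ((hMmem _).mpr ⟨k, Finset.mem_range.mp hk, rfl, by simpa using hji, hne⟩))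
  · rintro ⟨k, hk, hki, hdisj⟩
    have hkT : (k : Int) ∈ T :=
      Finset.mem_erase.mpr ⟨by simpa using hki, Finset.mem_image.mpr ⟨k, Finset.mem_range.mpr hk, rfl⟩⟩
    have hkM : (k : Int) ∉ M.toFinset := by
      rw [List.mem_toFinset, hMmem]
      rintro ⟨k', hk', hkk', _, hne⟩
      have hk'k : k' = k := by exact_mod_cast hkk'.symm
      subst hk'k
      exact hne hdisj
    have hss : M.toFinset ⊂ T := (Finset.ssubset_iff_of_subset hsub).mpr ⟨_, hkT, hkM⟩
    have := Finset.card_lt_card hss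
    rw [hTcard, ← hcard] at this
    have hn1 : 1 ≤ n := by omega
    omega

theorem pvLoopB_iff (sets : List (List Int)) :
    pvLoopB (pvBuildIndex sets) (sets.length : Int) sets = true ↔
      ∃ (i : Nat) (hi : i < sets.length) (k : Nat) (h : k < sets.length),
        k ≠ i ∧ PySem.Set.inter sets[k] sets[i] = [] := by
  unfold pvLoopB
  rw [List.any_eq_true]
  constructor
  · rintro ⟨p, hp, hpred⟩
    obtain ⟨k, hk, rfl⟩ := (PySem.List.mem_enumerate_iff _ _ _).mp hp
    simp only [zero_add, decide_eq_true_eq] at hpred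
    obtain ⟨k', hk', hne, hd⟩ := (pv_count_iff sets k hk).mp hpred
    exact ⟨k, hk, k', hk', hne, hd⟩
  · rintro ⟨i, hi, k, hk, hne, hd⟩
    refine ⟨((i : Int), sets[i]), ?_, ?_⟩
    · exact (PySem.List.mem_enumerate_iff _ _ _).mpr ⟨i, hi, by simp⟩
    · simp only [decide_eq_true_eq]
      exact (pv_count_iff sets i hi).mpr ⟨k, hk, hne, hd⟩

theorem pv_loops_eq (sets : List (List Int)) :
    pvLoopA sets = pvLoopB (pvBuildIndex sets) (sets.length : Int) sets := by
  have h : (pvLoopA sets = true) ↔ (pvLoopB (pvBuildIndex sets) (sets.length : Int) sets = true) := by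
    rw [pvLoopA_iff, pvLoopB_iff]
    constructor
    · rintro ⟨i, j, hi, hj, hij, hd⟩
      exact ⟨j, hj, i, hi, by omega, hd⟩
    · rintro ⟨i, hi, k, hk, hne, hd⟩
      rcases Nat.lt_or_ge k i with h1 | h1
      · exact ⟨k, i, hk, hi, h1, hd⟩
      · exact ⟨i, k, hi, hk, by omega, (pv_inter_nil_comm _ _).mp hd⟩
  exact Bool.coe_iff_coe.mp h

-- ===== VERDICT (by name: the statement is the Claim_ definition above) =====
theorem is_complex_multi_column_py_spec : Claim_equal_is_complex_multi_column_py := by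
  intro box _
  unfold Spec_is_complex_multi_column_py is_complex_multi_column_py is_complex_multi_column_py_alt
  simp only []
  split_ifs with h1 h2
  · rfl
  · rfl
  · exact pv_loops_eq _
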